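-- pv_equiv track=rewrite | github.com/gaomengnan/aoc | 2025/go-day/day7-python/main.py | can_obtain
-- ===== SOURCE A (Python) =====
-- def can_obtain(target, array):
--     if len(array) == 1:
--         return target == array[0]
--
--     if target % array[-1] == 0 and can_obtain(target // array[-1], array[:-1]):
--         return True
--     if target > array[-1] and can_obtain(target - array[-1], array[:-1]):
--         return True
--     return False
-- ===== SOURCE B (Python) =====
-- def can_obtain(target, array):
--     stack = [(target, len(array))]
--     while stack:
--         t, n = stack.pop()
--         if n == 1:
--             if t == array[0]:
--                 return True
--             continue
--         last = array[n - 1]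
--         if t > last:
--             stack.append((t - last, n - 1))
--         if t % last == 0:
--             stack.append((t // last, n - 1))
--     return False
-- ===== Notes on version B (the rewrite author's own statement) =====
-- stated objective: faster
-- what changed: Replaces the right-to-left recursion with slicing by an iterative DFS over an explicit LIFO stack of (target, prefix-length) states, indexing the array instead of copying array[:-1] slices at every call.
-- outside the precondition, e.g. on can_obtain(1, [9, 0, 2]): A returns False, B returns False; on can_obtain(4, [2, 0]): A raises ZeroDivisionError, B raises ZeroDivisionError
import Mathlib
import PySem

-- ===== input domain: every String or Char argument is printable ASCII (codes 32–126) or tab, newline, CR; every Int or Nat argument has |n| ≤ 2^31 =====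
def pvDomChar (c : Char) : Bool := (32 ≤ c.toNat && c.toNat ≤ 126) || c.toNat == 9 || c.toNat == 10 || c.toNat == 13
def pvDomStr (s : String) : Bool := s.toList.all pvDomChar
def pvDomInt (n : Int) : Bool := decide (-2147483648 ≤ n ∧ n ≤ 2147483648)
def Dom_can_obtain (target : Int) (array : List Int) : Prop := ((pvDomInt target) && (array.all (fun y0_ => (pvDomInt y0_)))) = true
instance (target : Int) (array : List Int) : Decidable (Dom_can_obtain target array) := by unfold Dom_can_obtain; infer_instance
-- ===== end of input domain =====

-- B replaces A's recursion-with-slicing by an iterative DFS over an explicit stack of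
-- (target, prefix-length) states (alternative decomposition, same search order).

-- ===== PORT A =====
-- Literal port of A: recursion peeling the last element (array[:-1] = dropLast on a
-- nonempty list, exact). array[-1] on an empty list is an IndexError: that input is
-- outside Pre_, the port returns false there only to be total.
def can_obtain (target : Int) (array : List Int) : Bool :=
  if array.length = 1 then
    decide (target = array.headD 0)          -- target == array[0]
  else if h : array = [] then
    false                                    -- array[-1]: IndexError, excluded by Pre_
  else
    let last := array.getLast h
    if (PySem.Int.mod target last == 0) && can_obtain (PySem.Int.floordiv target last) array.dropLast then
      true
    else if (decide (target > last)) && can_obtain (target - last) array.dropLast then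
      true
    else
      false
termination_by array.length
decreasing_by
  all_goals simp [List.length_dropLast]
  all_goals exact List.length_pos_iff.mpr h


-- ===== PORT B =====
-- The while-loop of Source B: pop a (t, n) state; n == 1 is the leaf test; otherwise push
-- the add branch then the multiply branch (so multiply is popped first, as in Source B).
-- t % 0 is a ZeroDivisionError in Source B; such states are excluded by Pre_.
def canObtainLoop (array : List Int) (stack : List (Int × Nat)) : Bool :=
  match stack with
  | [] => false
  | (t, n) :: rest =>
    if n = 1 then
      if t == array.headD 0 then true else canObtainLoop array rest
    else
      match n with
      | 0 => canObtainLoop array rest        -- only for array = []: IndexError in Source B, excluded by Pre_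
      | m + 1 =>
        let last := array.getD m 0
        canObtainLoop array
          ((if PySem.Int.mod t last == 0 then [(PySem.Int.floordiv t last, m)] else []) ++
           (if t > last then [(t - last, m)] else []) ++ rest)
termination_by (stack.map (fun s => 3 ^ s.2)).sum
decreasing_by
  · simp
  · simp
  · simp only [List.map_append, List.sum_append, List.map, List.sum_cons]
    have h3 : 0 < 3 ^ m := Nat.pow_pos (by omega)
    split_ifs <;> simp [pow_succ] <;> omega

def can_obtain_alt (target : Int) (array : List Int) : Bool :=
  canObtainLoop array [(target, array.length)]

-- ===== PRECONDITION & SPEC =====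
-- Pre_ excludes the empty array (A raises IndexError) and arrays with a zero after the
-- first element: any such zero can become the divisor of A's `target % array[-1]`
-- (ZeroDivisionError) depending on the search path, so all of them are excluded; on the
-- excluded zero-carrying inputs where A happens to return, B returns the same value.
def Pre_can_obtain (target : Int) (array : List Int) : Prop :=
  array ≠ [] ∧ 0 ∉ array.drop 1
instance (target : Int) (array : List Int) : Decidable (Pre_can_obtain target array) := by
  unfold Pre_can_obtain; infer_instance

def pvWitness_can_obtain : Int × List Int := (6, [2, 3])

def Spec_can_obtain (target : Int) (array : List Int) (out : Bool) : Prop := out = can_obtain_alt target array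
instance (target : Int) (array : List Int) (out : Bool) : Decidable (Spec_can_obtain target array out) := by unfold Spec_can_obtain; infer_instance

-- ===== CLAIM (what is proved, stated in full; the proofs are below) =====
def Claim_equal_can_obtain : Prop := ∀ (target : Int) (array : List Int), Dom_can_obtain target array → Pre_can_obtain target array → Spec_can_obtain target array (can_obtain target array)

-- ===== LEMMAS AND PROOFS =====

-- the last element of an (n+1)-prefix is l[n]
theorem getLast_take_succ (l : List Int) (n : Nat) (h : n + 1 <= l.length)
    (h2 : l.take (n+1) ≠ []) : (l.take (n+1)).getLast h2 = l.getD n 0 := by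
  rw [List.getLast_eq_getElem]
  have hlen : (l.take (n+1)).length = n + 1 := by simp; omega
  have hn : n < l.length := by omega
  simp only [hlen, Nat.add_sub_cancel]
  rw [List.getElem_take, List.getD_eq_getElem l 0 hn]

-- dropping the last element of an (n+1)-prefix gives the n-prefix
theorem dropLast_take_succ (l : List Int) (n : Nat) (h : n + 1 ≤ l.length) :
    (l.take (n+1)).dropLast = l.take n := by
  have hlen : (l.take (n+1)).length = n + 1 := by simp; omega
  rw [List.dropLast_eq_take, hlen, List.take_take]
  congr 1
  omega

-- Loop invariant: a stack entry (t, n) with n ≤ |array| stands for A's call on the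
-- n-element prefix, and the stack is processed left to right with ||.
theorem canObtainLoop_invariant (array : List Int) (n : Nat) (hn : n ≤ array.length)
    (t : Int) (rest : List (Int × Nat)) :
    canObtainLoop array ((t, n) :: rest)
      = (can_obtain t (array.take n) || canObtainLoop array rest) := by
  induction n generalizing t rest with
  | zero =>
    simp [canObtainLoop, can_obtain]
  | succ m ih =>
    match m with
    | 0 =>
      obtain ⟨a, tl, rfl⟩ := List.exists_cons_of_ne_nil
        (fun hc => by simp [hc] at hn : array ≠ [])
      cases h : t == a
      · simp [canObtainLoop, can_obtain, h, beq_eq_false_iff_ne.mp h]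
      · simp [canObtainLoop, can_obtain, beq_iff_eq.mp h]
    | k + 1 =>
      have hk : k + 1 ≤ array.length := by omega
      have hlen2 : (array.take (k + 1 + 1)).length = k + 1 + 1 := by simp; omega
      have hne : array.take (k + 1 + 1) ≠ [] := by
        intro hc; rw [hc] at hlen2; simp at hlen2
      have hlast : ∀ h2, (array.take (k + 1 + 1)).getLast h2 = array.getD (k + 1) 0 :=
        fun h2 => getLast_take_succ array (k + 1) hn h2
      rw [canObtainLoop, can_obtain]
      rw [if_neg (show ¬ (k + 1).succ = 1 by omega), if_neg (by rw [hlen2]; omega),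
        dif_neg hne]
      simp only [hlast, dropLast_take_succ array (k + 1) hn]
      set last := array.getD (k + 1) 0 with hl
      cases c1 : (PySem.Int.mod t last == 0) <;> by_cases c2 : t > last <;>
        simp [c2, ih hk] <;>
        (try cases can_obtain (PySem.Int.floordiv t last) (array.take (k + 1)) <;>
            cases can_obtain (t - last) (array.take (k + 1)) <;> simp)

theorem can_obtain_spec : Claim_equal_can_obtain := by
  intro _target array _ _hpre
  unfold Spec_can_obtain can_obtain_alt
  rw [canObtainLoop_invariant array array.length le_rfl]
  simp [canObtainLoop]
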